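-- pv_equiv track=rewrite | github.com/tsaqifimtinan/railnet | api/index.py | bfs_min_transfers
-- ===== SOURCE A (Python) =====
-- from typing import Dict, List, Tuple
--
-- def bfs_min_transfers(graph: Dict, start: str, end: str) -> Tuple[List[str], int]:
--     """
--     BFS to find path with minimum transfers (stations)
--     Returns: (path_list, number_of_transfers)
--     """
--     from collections import deque
--
--     queue = deque([(start, [start])])
--     visited = set([start])
--
--     while queue:
--         current_station, path = queue.popleft()
--
--         if current_station == end:
--             return path, len(path) - 1  # transfers = stations - 1
--
--         for neighbor, _ in graph.get(current_station, []):
--             if neighbor not in visited: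
--                 visited.add(neighbor)
--                 queue.append((neighbor, path + [neighbor]))
--
--     return [], -1  # No path found
-- ===== SOURCE B (Python) =====
-- from typing import Dict, List, Tuple
--
-- def bfs_min_transfers(graph: Dict, start: str, end: str) -> Tuple[List[str], int]:
--     """
--     BFS over a growing list with a read cursor; a parent map (station ->
--     previous station, None for the start) doubles as the visited set, and
--     the path is rebuilt once by walking the parent chain when the end
--     station is reached.  No path copies are carried in the queue.
--     """
--     parent = {start: None}
--     order = [start]
--     i = 0
--     while i < len(order):
--         u = order[i]
--         i += 1
--         if u == end:
--             path = []
--             node = u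
--             while node is not None:
--                 path = [node] + path
--                 node = parent[node]
--             return path, len(path) - 1
--         for v, _ in graph.get(u, []):
--             if v not in parent:
--                 parent[v] = u
--                 order.append(v)
--     return [], -1
-- ===== Notes on version B (the rewrite author's own statement) =====
-- stated objective: alternative
-- what changed: B drops A's deque of (station, copied-path) pairs: it scans a growing station list with a read cursor while a parent map (station -> optional predecessor) doubles as the visited set, and rebuilds the path once by walking the parent chain when the end station is reached.
import Mathlib
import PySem

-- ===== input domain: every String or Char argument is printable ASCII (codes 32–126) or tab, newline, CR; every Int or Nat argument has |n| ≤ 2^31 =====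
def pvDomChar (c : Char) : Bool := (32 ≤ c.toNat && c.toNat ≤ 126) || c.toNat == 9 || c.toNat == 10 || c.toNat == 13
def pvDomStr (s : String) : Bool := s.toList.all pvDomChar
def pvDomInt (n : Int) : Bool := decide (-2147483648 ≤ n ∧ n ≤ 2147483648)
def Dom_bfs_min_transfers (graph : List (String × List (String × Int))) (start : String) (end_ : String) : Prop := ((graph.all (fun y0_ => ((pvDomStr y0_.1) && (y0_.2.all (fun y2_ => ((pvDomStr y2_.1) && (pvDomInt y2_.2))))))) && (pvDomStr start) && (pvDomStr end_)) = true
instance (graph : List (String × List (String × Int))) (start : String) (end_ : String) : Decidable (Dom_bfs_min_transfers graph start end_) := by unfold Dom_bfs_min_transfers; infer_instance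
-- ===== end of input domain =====

-- B replaces A's deque of (station, copied path) by a cursor into a growing list of
-- stations plus a parent map (station -> Optional previous station) that doubles as
-- the visited set; the path is rebuilt once by walking the parent chain (objective:
-- alternative algorithm; no per-enqueue path copies).
-- Both loop ports take a fuel argument (a provable bound on the number of loop
-- iterations) only to make the Python 'while' loops structurally recursive; it
-- changes no value.

-- ===== PORT A =====
def pvLoopA (graph : PySem.Dict String (List (String × Int))) (end_ : String) :
    Nat → List (String × List String) → PySem.Set String → List String × Int
  | 0, _, _ => ([], -1)
  | _ + 1, [], _ => ([], -1)
  | fuel + 1, (cur, path) :: rest, visited =>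
      if cur == end_ then (path, (path.length : Int) - 1)
      else
        let st := (PySem.Dict.getD graph cur []).foldl
          (fun (st : List (String × List String) × PySem.Set String) nb =>
            if PySem.Set.contains st.2 nb.1 then st
            else (st.1 ++ [(nb.1, path ++ [nb.1])], PySem.Set.add st.2 nb.1))
          (rest, visited)
        pvLoopA graph end_ fuel st.1 st.2

def bfs_min_transfers (graph : List (String × List (String × Int))) (start : String) (end_ : String) : List String × Int :=
  pvLoopA (PySem.Dict.ofList graph) end_ ((graph.flatMap (fun p => p.2)).length + 2)
    [(start, [start])] (PySem.Set.ofList [start])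

-- ===== PORT B =====
-- 'path = []; node = u; while node is not None: path = [node] + path; node = parent[node]'
-- (every node on the chain is a key of parent, so Python's parent[node] is the getD below)
def pvParentPath (parent : PySem.Dict String (Option String)) : Nat → String → List String → List String
  | 0, node, acc => node :: acc
  | f + 1, node, acc =>
      match PySem.Dict.getD parent node none with
      | none => node :: acc
      | some p => pvParentPath parent f p (node :: acc)

-- 'while i < len(order):' — reading order[i] succeeds exactly when i < len(order)
def pvWalk (graph : PySem.Dict String (List (String × Int))) (end_ : String) :
    Nat → Int → List String → PySem.Dict String (Option String) → List String × Int
  | 0, _, _, _ => ([], -1)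
  | fuel + 1, i, order, parent =>
      match PySem.List.pyGet? order i with
      | none => ([], -1)
      | some u =>
          if u == end_ then
            let path := pvParentPath parent (PySem.Dict.size parent) u []
            (path, (path.length : Int) - 1)
          else
            let st := (PySem.Dict.getD graph u []).foldl
              (fun (st : List String × PySem.Dict String (Option String)) nb =>
                if PySem.Dict.contains st.2 nb.1 then st
                else (st.1 ++ [nb.1], PySem.Dict.insert st.2 nb.1 (some u)))
              (order, parent)
            pvWalk graph end_ fuel (i + 1) st.1 st.2

def bfs_min_transfers_alt (graph : List (String × List (String × Int))) (start : String) (end_ : String) : List String × Int :=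
  pvWalk (PySem.Dict.ofList graph) end_ ((graph.flatMap (fun p => p.2)).length + 2)
    0 [start] (PySem.Dict.ofList [(start, none)])

-- ===== PRECONDITION & SPEC =====
def Spec_bfs_min_transfers (graph : List (String × List (String × Int))) (start : String) (end_ : String) (out : List String × Int) : Prop := out = bfs_min_transfers_alt graph start end_
instance (graph : List (String × List (String × Int))) (start : String) (end_ : String) (out : List String × Int) : Decidable (Spec_bfs_min_transfers graph start end_ out) := by unfold Spec_bfs_min_transfers; infer_instance

-- ===== CLAIM (what is proved, stated in full; the proofs are below) =====
def Claim_equal_bfs_min_transfers : Prop := ∀ (graph : List (String × List (String × Int))) (start : String) (end_ : String), Dom_bfs_min_transfers graph start end_ → Spec_bfs_min_transfers graph start end_ (bfs_min_transfers graph start end_)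

-- ===== LEMMAS AND PROOFS =====

/-- The parent chain of `s` spells exactly the list `l` (oldest first, `s` last). -/
inductive PvTrail (parent : PySem.Dict String (Option String)) : String → List String → Prop
  | root (s : String) : parent.get? s = some none → PvTrail parent s [s]
  | step (s p : String) (l : List String) :
      parent.get? s = some (some p) → PvTrail parent p l → PvTrail parent s (l ++ [s])

theorem pvTrail_isSome {parent : PySem.Dict String (Option String)} {s : String}
    {l : List String} (h : PvTrail parent s l) : ∀ x ∈ l, (parent.get? x).isSome = true := by
  induction h with
  | root s hs => intro x hx; rw [List.mem_singleton] at hx; subst hx; rw [hs]; rfl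
  | step s p l hs hc ih =>
      intro x hx
      rcases List.mem_append.mp hx with hx | hx
      · exact ih x hx
      · rw [List.mem_singleton] at hx; subst hx; rw [hs]; rfl

theorem pvTrail_eval {parent : PySem.Dict String (Option String)} {s : String}
    {l : List String} (h : PvTrail parent s l) :
    ∀ f acc, l.length ≤ f + 1 → pvParentPath parent f s acc = l ++ acc := by
  induction h with
  | root s hs =>
      intro f acc _
      cases f with
      | zero => rfl
      | succ f => simp [pvParentPath, PySem.Dict.getD_eq_get?_getD, hs]
  | step s p l hs hc ih =>
      intro f acc hf
      have hl1 : 1 ≤ l.length := List.length_pos_iff.mpr (by cases hc <;> simp)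
      cases f with
      | zero => simp only [List.length_append, List.length_singleton] at hf; omega
      | succ f =>
          have : l.length ≤ f + 1 := by
            simp only [List.length_append, List.length_singleton] at hf; omega
          simp only [pvParentPath, PySem.Dict.getD_eq_get?_getD, hs, Option.getD_some,
            ih f (s :: acc) this]
          simp

theorem pvTrail_length_le {parent : PySem.Dict String (Option String)} {s : String}
    {l : List String} (h : PvTrail parent s l) (hnd : l.Nodup) :
    l.length ≤ PySem.Dict.size parent := by
  have hsub : l ⊆ parent.keys := by
    intro x hx
    have := pvTrail_isSome h x hx
    have hc : parent.contains x = true := by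
      rw [PySem.Dict.contains_eq_isSome_get?]; exact this
    exact (PySem.Dict.contains_iff_mem_keys _ _).mp hc
  have hle : l.length ≤ parent.keys.length := (hnd.subperm hsub).length_le
  have : parent.keys.length = PySem.Dict.size parent := by
    simp [PySem.Dict.keys, PySem.Dict.size]
  omega

theorem pvTrail_insert {parent : PySem.Dict String (Option String)} {s : String}
    {l : List String} {k : String} {v : Option String} (h : PvTrail parent s l)
    (hk : parent.get? k = none) : PvTrail (parent.insert k v) s l := by
  have hne : ∀ x, (parent.get? x).isSome = true → x ≠ k := by
    intro x hx he; subst he; rw [hk] at hx; exact absurd hx (by simp)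
  induction h with
  | root s hs =>
      exact PvTrail.root s
        (by rw [PySem.Dict.get?_insert_of_ne _ _ (hne s (by rw [hs]; rfl)), hs])
  | step s p l hs hc ih =>
      exact PvTrail.step s p l
        (by rw [PySem.Dict.get?_insert_of_ne _ _ (hne s (by rw [hs]; rfl)), hs]) ih

theorem pv_forall₂_append {α β : Type} {R : α → β → Prop} {l1 u1 : List α} {l2 u2 : List β}
    (h : List.Forall₂ R l1 l2) (h2 : List.Forall₂ R u1 u2) :
    List.Forall₂ R (l1 ++ u1) (l2 ++ u2) := by
  induction h with
  | nil => exact h2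
  | cons hr _ ih => exact List.Forall₂.cons hr ih

/-- Relation between an A-queue entry and a station in B's order list. -/
def PvR (parent : PySem.Dict String (Option String))
    (a : String × List String) (b : String) : Prop :=
  a.1 = b ∧ PvTrail parent b a.2 ∧ a.2.Nodup

/-- A's visited set and B's parent map hold the same stations. -/
def PvVisEq (visited : PySem.Set String) (parent : PySem.Dict String (Option String)) : Prop :=
  ∀ s : String, PySem.Set.contains visited s = parent.contains s

/-- B's neighbour loop only appends to `order`: the prefix factors out. -/
theorem pv_foldB_append (u : String) (nbrs : List (String × Int)) :
    ∀ (a x : List String) (parent : PySem.Dict String (Option String)),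
    nbrs.foldl
      (fun (st : List String × PySem.Dict String (Option String)) nb =>
        if PySem.Dict.contains st.2 nb.1 then st
        else (st.1 ++ [nb.1], PySem.Dict.insert st.2 nb.1 (some u)))
      (a ++ x, parent)
    = (a ++ (nbrs.foldl
        (fun (st : List String × PySem.Dict String (Option String)) nb =>
          if PySem.Dict.contains st.2 nb.1 then st
          else (st.1 ++ [nb.1], PySem.Dict.insert st.2 nb.1 (some u)))
        (x, parent)).1,
       (nbrs.foldl
        (fun (st : List String × PySem.Dict String (Option String)) nb =>
          if PySem.Dict.contains st.2 nb.1 then st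
          else (st.1 ++ [nb.1], PySem.Dict.insert st.2 nb.1 (some u)))
        (x, parent)).2) := by
  induction nbrs with
  | nil => intro a x parent; rfl
  | cons nb nbrs ih =>
      intro a x parent
      simp only [List.foldl_cons]
      by_cases hc : PySem.Dict.contains parent nb.1 = true
      · simp only [hc, if_true]; exact ih a x parent
      · simp only [hc, if_false, Bool.false_eq_true, List.append_assoc]
        exact ih a (x ++ [nb.1]) _

theorem pv_fold_sim (path : List String) (u : String) (nbrs : List (String × Int)) :
    ∀ (qA : List (String × List String)) (qB : List String)
      (visited : PySem.Set String) (parent : PySem.Dict String (Option String)),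
    List.Forall₂ (PvR parent) qA qB → PvVisEq visited parent →
    PvTrail parent u path → path.Nodup →
    List.Forall₂
        (PvR (nbrs.foldl
            (fun (st : List String × PySem.Dict String (Option String)) nb =>
              if PySem.Dict.contains st.2 nb.1 then st
              else (st.1 ++ [nb.1], PySem.Dict.insert st.2 nb.1 (some u)))
            (qB, parent)).2)
        (nbrs.foldl
            (fun (st : List (String × List String) × PySem.Set String) nb =>
              if PySem.Set.contains st.2 nb.1 then st
              else (st.1 ++ [(nb.1, path ++ [nb.1])], PySem.Set.add st.2 nb.1))
            (qA, visited)).1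
        (nbrs.foldl
            (fun (st : List String × PySem.Dict String (Option String)) nb =>
              if PySem.Dict.contains st.2 nb.1 then st
              else (st.1 ++ [nb.1], PySem.Dict.insert st.2 nb.1 (some u)))
            (qB, parent)).1
    ∧ PvVisEq
        (nbrs.foldl
            (fun (st : List (String × List String) × PySem.Set String) nb =>
              if PySem.Set.contains st.2 nb.1 then st
              else (st.1 ++ [(nb.1, path ++ [nb.1])], PySem.Set.add st.2 nb.1))
            (qA, visited)).2
        (nbrs.foldl
            (fun (st : List String × PySem.Dict String (Option String)) nb =>
              if PySem.Dict.contains st.2 nb.1 then st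
              else (st.1 ++ [nb.1], PySem.Dict.insert st.2 nb.1 (some u)))
            (qB, parent)).2 := by
  induction nbrs with
  | nil => intro qA qB visited parent hq hv _ _; exact ⟨hq, hv⟩
  | cons nb nbrs ih =>
      intro qA qB visited parent hq hv ht hnd
      simp only [List.foldl_cons]
      by_cases hmem : PySem.Dict.contains parent nb.1 = true
      · simp only [hmem, hv nb.1, if_true]
        exact ih qA qB visited parent hq hv ht hnd
      · simp only [hmem, hv nb.1, if_false, Bool.false_eq_true]
        have hnone : parent.get? nb.1 = none := by
          rw [PySem.Dict.contains_eq_isSome_get?] at hmem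
          exact Option.not_isSome_iff_eq_none.mp (by simp [hmem])
        have hnotin : nb.1 ∉ (visited : List String) := by
          intro hx
          exact absurd (hv nb.1 ▸ (PySem.Set.contains_iff _ _).mpr hx) hmem
        have hfreshpath : nb.1 ∉ path := fun hx => by
          have := pvTrail_isSome ht nb.1 hx
          rw [hnone] at this; exact absurd this (by simp)
        have ht' : PvTrail (parent.insert nb.1 (some u)) u path := pvTrail_insert ht hnone
        apply ih
        · apply pv_forall₂_append
          · refine List.Forall₂.imp ?_ hq
            intro a b hr
            obtain ⟨h1, h2, h3⟩ := hr
            exact ⟨h1, pvTrail_insert h2 hnone, h3⟩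
          · refine List.forall₂_cons.mpr ⟨⟨rfl, ?_, ?_⟩, List.Forall₂.nil⟩
            · exact PvTrail.step nb.1 u path (PySem.Dict.get?_insert_self _ _ _) ht'
            · exact List.Nodup.append hnd (List.nodup_singleton _)
                (fun x hx hy => (List.mem_singleton.mp hy ▸ hfreshpath) hx)
        · intro s
          rw [PySem.Set.add_of_not_mem hnotin, PySem.Dict.contains_insert, ← hv s]
          by_cases hs : s = nb.1
          · subst hs
            simp [PySem.Set.contains_eq_listContains]
          · simp [PySem.Set.contains_eq_listContains, hs]
        · exact ht'
        · exact hnd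

theorem pv_loop_sim (graph : PySem.Dict String (List (String × Int))) (end_ : String) :
    ∀ (fuel : Nat) (qA : List (String × List String)) (i : Nat) (order : List String)
      (visited : PySem.Set String) (parent : PySem.Dict String (Option String)),
    List.Forall₂ (PvR parent) qA (order.drop i) → PvVisEq visited parent →
    pvLoopA graph end_ fuel qA visited = pvWalk graph end_ fuel (i : Int) order parent := by
  intro fuel
  induction fuel with
  | zero => intro qA i order visited parent _ _; rfl
  | succ fuel ih =>
      intro qA i order visited parent hq hv
      cases hqe : qA with
      | nil =>
          subst hqe
          have hd : order.drop i = [] := List.forall₂_nil_left_iff.mp hq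
          have hlen : order.length ≤ i := by
            by_contra hlt
            exact absurd hd (by simp [List.drop_eq_nil_iff]; omega)
          have : PySem.List.pyGet? order (i : Int) = none := by
            rw [PySem.List.pyGet?_natCast]
            exact List.getElem?_eq_none hlen
          simp [pvLoopA, pvWalk, this]
      | cons hd rest =>
          obtain ⟨u, p⟩ := hd
          subst hqe
          obtain ⟨b, t, hr, hrest, hdrop⟩ := List.forall₂_cons_left_iff.mp hq
          obtain ⟨h1, htrail, hnd⟩ := hr
          simp only at h1
          subst h1
          have hget : PySem.List.pyGet? order (i : Int) = some u := by
            rw [PySem.List.pyGet?_natCast]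
            have : (order.drop i)[0]? = some u := by rw [hdrop]; rfl
            rw [List.getElem?_drop] at this
            simpa using this
          have hlt : i < order.length := by
            by_contra hge
            rw [List.drop_eq_nil_iff.mpr (by omega)] at hdrop
            exact absurd hdrop (by simp)
          simp only [pvLoopA, pvWalk, hget]
          by_cases he : u == end_
          · simp only [he, if_true]
            rw [pvTrail_eval htrail (PySem.Dict.size parent) []
              (le_trans (pvTrail_length_le htrail hnd) (Nat.le_succ _)), List.append_nil]
          · simp only [he, if_false, Bool.false_eq_true]
            -- factor B's fold: order = order.take (i+1) ++ t
            have horder : order = order.take (i + 1) ++ t := by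
              have h1 : order.drop (i + 1) = t := by
                have : (order.drop i).drop 1 = t := by rw [hdrop]; rfl
                rwa [List.drop_drop] at this
              conv_lhs => rw [← List.take_append_drop (i + 1) order, h1]
            have htk : (order.take (i + 1)).length = i + 1 :=
              by rw [List.length_take]; omega
            obtain ⟨hfq, hfv⟩ :=
              pv_fold_sim p u (PySem.Dict.getD graph u []) rest t visited parent
                hrest hv htrail hnd
            rw [horder, pv_foldB_append]
            have hip : ((i : Int) + 1) = ((i + 1 : Nat) : Int) := by push_cast; ring
            rw [hip]
            apply ih
            · rw [List.drop_append_of_le_length (by omega)]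
              simpa [List.drop_take] using hfq
            · exact hfv

-- ===== VERDICT (by name: the statement is the Claim_ definition above) =====
theorem bfs_min_transfers_spec : Claim_equal_bfs_min_transfers := by
  intro graph start end_ _
  unfold Spec_bfs_min_transfers bfs_min_transfers bfs_min_transfers_alt
  have hinit : (PySem.Dict.ofList [(start, (none : Option String))])
      = PySem.Dict.empty.insert start none := rfl
  rw [(by norm_num : (0 : Int) = ((0 : Nat) : Int))]
  apply pv_loop_sim
  · refine List.forall₂_cons.mpr ⟨⟨rfl, ?_, List.nodup_singleton _⟩, List.Forall₂.nil⟩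
    rw [hinit]
    exact PvTrail.root start (PySem.Dict.get?_insert_self _ _ _)
  · intro s
    rw [hinit]
    by_cases hs : s = start
    · subst hs
      simp [PySem.Set.contains_eq_listContains, PySem.Dict.contains_insert_self,
        PySem.Set.ofList]
    · rw [PySem.Dict.contains_insert]
      simp only [(by simp [hs] : (s == start) = false), Bool.false_or,
        PySem.Dict.contains_empty]
      simp [PySem.Set.contains_eq_listContains, PySem.Set.ofList, PySem.Set.add, hs]
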